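-- pv_equiv track=rewrite | github.com/Revnth/Hacktoberfest2022 | test.py | DecreasingArray
-- ===== SOURCE A (Python) =====
-- from queue import PriorityQueue
--
-- def DecreasingArray(a, n):
--
-- 	ss, dif = (0,0)
--
-- 	# min heap
-- 	pq = PriorityQueue()
--
-- 	# Here in the loop we will
-- 	# check that whether the upcoming
-- 	# element of array is less than top
-- 	# of priority queue. If yes then we
-- 	# calculate the difference. After
-- 	# that we will remove that element
-- 	# and push the current element in
-- 	# queue. And the sum is incremented
-- 	# by the value of difference
-- 	for i in range(n):
-- 		tmp = 0
--
-- 		if not pq.empty():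
-- 			tmp = pq.get()
-- 			pq.put(tmp)
--
-- 		if not pq.empty() and tmp < a[i]:
-- 			dif = a[i] - tmp
-- 			ss += dif
-- 			pq.get()
-- 			pq.put(a[i])
--
-- 		pq.put(a[i])
--
-- 	return ss
-- ===== SOURCE B (Python) =====
-- def DecreasingArray(a, n):
--     # DP over the sorted distinct value grid: h[j] = min cost to make the
--     # processed prefix non-increasing with its last element <= vals[j].
--     xs = [a[i] for i in range(n)]
--     vals = sorted(set(xs))
--     h = [0] * len(vals)
--     for x in xs:
--         f = [abs(x - v) + hv for v, hv in zip(vals, h)]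
--         for j in range(len(f) - 2, -1, -1):
--             f[j] = min(f[j], f[j + 1])
--         h = f
--     return h[0] if h else 0
-- ===== Notes on version B (the rewrite author's own statement) =====
-- stated objective: alternative
-- what changed: Replaces the priority-queue slope-trick greedy (peek/replace the minimum of the seen multiset) by a dynamic program over the sorted distinct value grid - each step builds |x-v|+h[v] and sweeps suffix minima - trading the heap's O(n log n) for an O(n*d) table but keeping no heap, no multiset and no running minimum.
import Mathlib
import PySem

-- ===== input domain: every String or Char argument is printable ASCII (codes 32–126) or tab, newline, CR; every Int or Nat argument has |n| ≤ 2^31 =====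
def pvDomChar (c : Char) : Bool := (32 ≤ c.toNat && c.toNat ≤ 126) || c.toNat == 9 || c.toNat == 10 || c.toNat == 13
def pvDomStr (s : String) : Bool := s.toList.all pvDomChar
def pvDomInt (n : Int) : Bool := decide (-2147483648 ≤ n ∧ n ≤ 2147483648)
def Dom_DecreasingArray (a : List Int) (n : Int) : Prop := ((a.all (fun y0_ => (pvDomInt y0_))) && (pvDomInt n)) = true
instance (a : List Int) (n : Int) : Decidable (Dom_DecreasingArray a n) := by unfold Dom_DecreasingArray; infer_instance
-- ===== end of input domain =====

-- B replaces A's priority-queue greedy (peek/replace the minimum of the seen multiset) by a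
-- dynamic program over the sorted distinct value grid with suffix-minimum sweeps; equality of
-- the returned value is proved via the invariant  h = vals.map (λ v, ss + Σ_{m∈pq} max 0 (v−m)).

-- ===== PORT A =====
-- model of queue.PriorityQueue over Int: `get` returns/removes the minimum, `put` appends.
def pqGet (pq : List Int) : Int :=
  match PySem.List.min? pq (fun y => y) with
  | some m => m
  | none => 0

-- one iteration of A's loop, on the current (ss, pq) state and the value x = a[i]
def bodyA (st : Int × List Int) (x : Int) : Int × List Int :=
    let ss := st.1
    let pq := st.2
    -- tmp = 0 ; if not pq.empty(): tmp = pq.get(); pq.put(tmp)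
    let peek : Int × List Int :=
      if pq = [] then (0, pq)
      else
        let t := pqGet pq
        (t, pq.erase t ++ [t])
    let tmp := peek.1
    let pq1 := peek.2
    -- if not pq.empty() and tmp < a[i]: dif = a[i]-tmp; ss += dif; pq.get(); pq.put(a[i])
    if ¬ pq1 = [] ∧ tmp < x then
      let dif := x - tmp
      let pq2 := (pq1.erase (pqGet pq1)) ++ [x]
      (ss + dif, pq2 ++ [x])                  -- trailing pq.put(a[i])
    else
      (ss, pq1 ++ [x])                        -- trailing pq.put(a[i])

def DecreasingArray (a : List Int) (n : Int) : Int :=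
  ((PySem.List.pyRange 0 n 1).foldl
    (fun st i => bodyA st (PySem.List.pyGetD a i 0)) ((0 : Int), ([] : List Int))).1

-- ===== PORT B =====
-- the in-place backward sweep  for j in range(len(f)-2,-1,-1): f[j] = min(f[j], f[j+1])
def suffMin : List Int → List Int
  | [] => []
  | x :: t =>
    match suffMin t with
    | [] => [x]
    | y :: t' => min x y :: y :: t'

-- one iteration of B's loop: f = [abs(x-v)+hv for v,hv in zip(vals,h)], then the sweep
def stepB (vals : List Int) (h : List Int) (x : Int) : List Int :=
  suffMin (List.zipWith (fun v hv => |x - v| + hv) vals h)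

def DecreasingArray_alt (a : List Int) (n : Int) : Int :=
  let xs := (PySem.List.pyRange 0 n 1).map (fun i => PySem.List.pyGetD a i 0)
  let vals := PySem.List.sorted (PySem.Set.ofList xs) (fun v => v) false
  let h := xs.foldl (stepB vals) (List.replicate vals.length 0)
  h.headD 0                                   -- h[0] if h else 0

-- ===== PRECONDITION & SPEC =====
-- Pre_ excludes exactly the inputs where A raises IndexError: a[i] with n > len(a).
def Pre_DecreasingArray (a : List Int) (n : Int) : Prop := n ≤ (a.length : Int)
instance (a : List Int) (n : Int) : Decidable (Pre_DecreasingArray a n) := by unfold Pre_DecreasingArray; infer_instance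
def pvWitness_DecreasingArray : List Int × Int := ([3, 1, 2, 5], 4)

def Spec_DecreasingArray (a : List Int) (n : Int) (out : Int) : Prop := out = DecreasingArray_alt a n
instance (a : List Int) (n : Int) (out : Int) : Decidable (Spec_DecreasingArray a n out) := by unfold Spec_DecreasingArray; infer_instance

-- ===== CLAIM (what is proved, stated in full; the proofs are below) =====
def Claim_equal_DecreasingArray : Prop := ∀ (a : List Int) (n : Int), Dom_DecreasingArray a n → Pre_DecreasingArray a n → Spec_DecreasingArray a n (DecreasingArray a n)

-- ===== LEMMAS AND PROOFS =====

-- heap "potential": R pq v = Σ_{m∈pq} max 0 (v−m); B's DP row is vals.map (λ v, ss + R pq v)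
def R (M : List Int) (v : Int) : Int := (M.map (fun m => max 0 (v - m))).sum

theorem R_perm {M M' : List Int} (h : M.Perm M') (v : Int) : R M v = R M' v :=
  (h.map _).sum_eq

theorem R_cons (m : Int) (M : List Int) (v : Int) : R (m :: M) v = max 0 (v - m) + R M v := by
  simp [R]

theorem R_zero_of_le {M : List Int} {v : Int} (h : ∀ m ∈ M, v ≤ m) : R M v = 0 := by
  induction M with
  | nil => simp [R]
  | cons m t ih =>
    have h1 : v ≤ m := h m (by simp)
    rw [R_cons, ih (fun y hy => h y (by simp [hy]))]
    omega

theorem R_mono {v v' : Int} (M : List Int) (h : v ≤ v') : R M v ≤ R M v' := by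
  induction M with
  | nil => simp [R]
  | cons m t ih => rw [R_cons, R_cons]; omega

theorem R_strict {M : List Int} {m0 v v' : Int} (hmem : m0 ∈ M) (h0 : m0 ≤ v) (h : v ≤ v') :
    R M v + (v' - v) ≤ R M v' := by
  induction M with
  | nil => simp at hmem
  | cons m t ih =>
    rw [R_cons, R_cons]
    rcases List.mem_cons.mp hmem with rfl | hmem'
    · have := R_mono (v := v) (v' := v') t h
      omega
    · have := ih hmem'
      omega

-- the PriorityQueue peek is the minimum of the held multiset
theorem pqGet_spec {pq : List Int} (h : pq ≠ []) : pqGet pq ∈ pq ∧ ∀ y ∈ pq, pqGet pq ≤ y := by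
  obtain ⟨m', hm'⟩ : ∃ m', PySem.List.min? pq (fun y => y) = some m' := by
    cases hc : PySem.List.min? pq (fun y => y) with
    | some m' => exact ⟨m', rfl⟩
    | none => exact absurd ((PySem.List.min?_eq_none_iff pq (fun y => y)).mp hc) h
  refine ⟨?_, ?_⟩
  · simpa [pqGet, hm'] using PySem.List.min?_mem hm'
  · intro y hy
    simpa [pqGet, hm'] using PySem.List.min?_isMin hm' y hy

-- characterisation of one iteration of A: sum increment and resulting multiset up to permutation
theorem bodyA_char (ss : Int) (pq : List Int) (x : Int) :
    (pq ≠ [] ∧ pqGet pq < x ∧ (bodyA (ss, pq) x).1 = ss + (x - pqGet pq) ∧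
      (bodyA (ss, pq) x).2.Perm (x :: x :: pq.erase (pqGet pq)))
    ∨ ((pq = [] ∨ x ≤ pqGet pq) ∧ (bodyA (ss, pq) x).1 = ss ∧
      (bodyA (ss, pq) x).2.Perm (x :: pq)) := by
  by_cases hne : pq = []
  · subst hne
    right
    refine ⟨Or.inl rfl, ?_, ?_⟩ <;> simp [bodyA]
  · have hmin := pqGet_spec hne
    have hperm1 : (pq.erase (pqGet pq) ++ [pqGet pq]).Perm pq :=
      (List.perm_append_singleton _ _).trans (List.perm_cons_erase hmin.1).symm
    have hne1 : pq.erase (pqGet pq) ++ [pqGet pq] ≠ [] := by simp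
    have hget1 : pqGet (pq.erase (pqGet pq) ++ [pqGet pq]) = pqGet pq := by
      have h1 := pqGet_spec hne1
      exact le_antisymm (h1.2 _ (hperm1.symm.mem_iff.mp hmin.1))
        (hmin.2 _ (hperm1.mem_iff.mp h1.1))
    by_cases hlt : pqGet pq < x
    · left
      refine ⟨hne, hlt, ?_, ?_⟩
      · simp [bodyA, hne, hne1, hlt]
      · have hbody : (bodyA (ss, pq) x).2
            = ((pq.erase (pqGet pq) ++ [pqGet pq]).erase (pqGet pq) ++ [x]) ++ [x] := by
          simp [bodyA, hne, hne1, hlt, hget1]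
        rw [hbody]
        have he : ((pq.erase (pqGet pq) ++ [pqGet pq]).erase (pqGet pq)).Perm
            (pq.erase (pqGet pq)) := hperm1.erase _
        exact (List.perm_append_singleton _ _).trans
          (((List.perm_append_singleton _ _).cons x).trans ((he.cons x).cons x))
    · right
      refine ⟨Or.inr (by omega), ?_, ?_⟩
      · simp [bodyA, hne, hlt]
      · have hbody : (bodyA (ss, pq) x).2 = (pq.erase (pqGet pq) ++ [pqGet pq]) ++ [x] := by
          simp [bodyA, hne, hlt]
        rw [hbody]
        exact (List.perm_append_singleton _ _).trans (hperm1.cons x)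

-- suffix-minimum of a map over a strictly sorted grid of a function unimodal around t
theorem suffMin_map (φ : Int → Int) (t : Int)
    (mup : ∀ w w', t ≤ w → w ≤ w' → φ w ≤ φ w')
    (mdn : ∀ w w', w ≤ w' → w' ≤ t → φ w' ≤ φ w) :
    ∀ (l : List Int), l.Pairwise (· < ·) → (t ∈ l ∨ ∀ w ∈ l, t ≤ w) →
      suffMin (l.map φ) = l.map (fun v => φ (max v t)) := by
  intro l
  induction l with
  | nil => intro _ _; rfl
  | cons v l ih =>
    intro hs ht
    have hvl : ∀ w ∈ l, v < w := (List.pairwise_cons.mp hs).1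
    have ht' : t ∈ l ∨ ∀ w ∈ l, t ≤ w := by
      rcases ht with h | h
      · rcases List.mem_cons.mp h with rfl | h'
        · exact Or.inr (fun w hw => le_of_lt (hvl w hw))
        · exact Or.inl h'
      · exact Or.inr (fun w hw => h w (by simp [hw]))
    have ihl := ih (List.pairwise_cons.mp hs).2 ht'
    cases l with
    | nil =>
      have hv : t ≤ v := by
        rcases ht with h | h
        · simp at h; omega
        · exact h v (by simp)
      simp [suffMin, max_eq_left hv]
    | cons v' l' =>
      have hone : suffMin (φ v :: (φ v' :: List.map φ l'))
          = match suffMin (φ v' :: List.map φ l') with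
            | [] => [φ v]
            | y :: t' => min (φ v) y :: y :: t' := rfl
      simp only [List.map_cons] at ihl
      simp only [List.map_cons]
      rw [hone, ihl]
      simp only [List.map_cons]
      congr 1
      by_cases hv : t ≤ v
      · have hv' : t ≤ v' := le_of_lt (lt_of_le_of_lt hv (hvl v' (by simp)))
        rw [max_eq_left hv', max_eq_left hv]
        exact min_eq_left (mup v v' hv (le_of_lt (hvl v' (by simp))))
      · have hv2 : v < t := by omega
        have htl : t ∈ v' :: l' := by
          rcases ht with h | h
          · rcases List.mem_cons.mp h with rfl | h'
            · omega
            · exact h'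
          · exact absurd (h v (by simp)) (by omega)
        have hv't : v' ≤ t := by
          rcases List.mem_cons.mp htl with rfl | h'
          · exact le_refl _
          · exact le_of_lt ((List.pairwise_cons.mp (List.pairwise_cons.mp hs).2).1 t h')
        rw [max_eq_right hv't, max_eq_right (le_of_lt hv2)]
        exact min_eq_right (mdn v t (le_of_lt hv2) (le_refl t))

-- collapse  zipWith f vals (vals.map g)  to a single map
theorem zipWith_map_self {α β γ : Type} (f : α → β → γ) (g : α → β) (l : List α) :
    List.zipWith f l (l.map g) = l.map (fun v => f v (g v)) := by
  induction l with
  | nil => rfl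
  | cons v t ih => simp [ih]

-- the key step: one B iteration on the invariant row equals the invariant row of one A iteration
theorem key_step (vals : List Int) (hs : vals.Pairwise (· < ·)) (x : Int) (hx : x ∈ vals)
    (pq : List Int) (hpq : ∀ m ∈ pq, m ∈ vals) (ss : Int) :
    stepB vals (vals.map (fun v => ss + R pq v)) x
      = vals.map (fun v => (bodyA (ss, pq) x).1 + R (bodyA (ss, pq) x).2 v) := by
  have hcoll : stepB vals (vals.map (fun v => ss + R pq v)) x
      = suffMin (vals.map (fun v => |x - v| + (ss + R pq v))) := by
    unfold stepB; rw [zipWith_map_self]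
  set φ : Int → Int := fun v => |x - v| + (ss + R pq v) with hφ
  set t : Int := if pq = [] then x else min x (pqGet pq) with htdef
  have htx : t ≤ x := by rw [htdef]; split <;> simp
  have hR0 : ∀ w : Int, w ≤ t → R pq w = 0 := by
    intro w hw
    apply R_zero_of_le
    intro m hm
    have hne : pq ≠ [] := by intro h; simp [h] at hm
    have := (pqGet_spec hne).2 m hm
    rw [htdef, if_neg hne] at hw
    omega
  have mup : ∀ w w', t ≤ w → w ≤ w' → φ w ≤ φ w' := by
    intro w w' hw hww'
    simp only [hφ]
    by_cases hxw : x ≤ w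
    · have := R_mono (v := w) (v' := w') pq hww'
      simp only [Int.abs_eq_natAbs]
      omega
    · have hne : pq ≠ [] := by
        intro h; rw [htdef, if_pos h] at hw; omega
      have hm0 : pqGet pq ≤ w := by
        rw [htdef, if_neg hne] at hw; omega
      have hstrict := R_strict (pqGet_spec hne).1 hm0 hww'
      simp only [Int.abs_eq_natAbs]
      omega
  have mdn : ∀ w w', w ≤ w' → w' ≤ t → φ w' ≤ φ w := by
    intro w w' hww' hw'
    simp only [hφ, hR0 w (by omega), hR0 w' hw', Int.abs_eq_natAbs]
    omega
  have htmem : t ∈ vals ∨ ∀ w ∈ vals, t ≤ w := by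
    left
    rw [htdef]
    split
    · exact hx
    · rename_i hne
      rcases le_total x (pqGet pq) with h | h
      · rw [min_eq_left h]; exact hx
      · rw [min_eq_right h]; exact hpq _ (pqGet_spec hne).1
  rw [hcoll, suffMin_map φ t mup mdn vals hs htmem]
  apply List.map_congr_left
  intro v _
  rcases bodyA_char ss pq x with ⟨hne, hlt, hss, hperm⟩ | ⟨hcase, hss, hperm⟩
  · -- cost branch: t = pqGet pq, new multiset ~ x :: x :: pq.erase (pqGet pq)
    have hteq : t = pqGet pq := by
      rw [htdef, if_neg hne, min_eq_right (le_of_lt hlt)]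
    have hRsplit : R pq v = max 0 (v - pqGet pq) + R (pq.erase (pqGet pq)) v := by
      rw [R_perm (List.perm_cons_erase (pqGet_spec hne).1) v, R_cons]
    rw [hss, R_perm hperm v, R_cons, R_cons]
    by_cases hv : v ≤ t
    · rw [max_eq_right hv]
      have h0 : R pq t = 0 := hR0 t le_rfl
      have h0' : R (pq.erase (pqGet pq)) v = 0 := R_zero_of_le (fun m hm => by
        have := (pqGet_spec hne).2 m (List.mem_of_mem_erase hm)
        omega)
      simp only [hφ, h0, h0', Int.abs_eq_natAbs]
      rw [hteq] at hv ⊢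
      omega
    · have hv2 : t < v := lt_of_not_ge hv
      rw [max_eq_left (le_of_lt hv2)]
      simp only [hφ, hRsplit, Int.abs_eq_natAbs]
      rw [hteq] at hv2
      omega
  · -- no-cost branch: t = x, new multiset ~ x :: pq
    have hteq : t = x := by
      rw [htdef]
      split
      · rfl
      · rename_i hne
        rcases hcase with h | h
        · exact absurd h hne
        · exact min_eq_left h
    rw [hss, R_perm hperm v, R_cons]
    by_cases hv : v ≤ x
    · rw [← hteq] at hv
      rw [max_eq_right hv]
      simp only [hφ, hR0 t le_rfl, hR0 v hv, Int.abs_eq_natAbs]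
      rw [hteq] at hv ⊢
      omega
    · have hv2 : x < v := lt_of_not_ge hv
      rw [← hteq] at hv2
      rw [max_eq_left (le_of_lt hv2)]
      simp only [hφ, Int.abs_eq_natAbs]
      rw [hteq] at hv2
      omega

-- main loop invariant: B's DP row tracks A's (sum, multiset) state; the multiset stays inside the grid
theorem fold_inv (vals : List Int) (hs : vals.Pairwise (· < ·)) :
    ∀ (xs : List Int), (∀ y ∈ xs, y ∈ vals) → ∀ (ss : Int) (pq : List Int),
      (∀ m ∈ pq, m ∈ vals) →
      xs.foldl (stepB vals) (vals.map (fun v => ss + R pq v))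
          = vals.map (fun v => (xs.foldl bodyA (ss, pq)).1 + R ((xs.foldl bodyA (ss, pq)).2) v)
        ∧ ∀ m ∈ (xs.foldl bodyA (ss, pq)).2, m ∈ vals := by
  intro xs
  induction xs with
  | nil => intro _ ss pq hpq; exact ⟨rfl, hpq⟩
  | cons x xs ih =>
    intro hxs ss pq hpq
    have hx : x ∈ vals := hxs x (by simp)
    have hpq' : ∀ m ∈ (bodyA (ss, pq) x).2, m ∈ vals := by
      intro m hm
      rcases bodyA_char ss pq x with ⟨_, _, _, hperm⟩ | ⟨_, _, hperm⟩
      · rcases List.mem_cons.mp (hperm.mem_iff.mp hm) with rfl | hm'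
        · exact hx
        · rcases List.mem_cons.mp hm' with rfl | hm''
          · exact hx
          · exact hpq m (List.mem_of_mem_erase hm'')
      · rcases List.mem_cons.mp (hperm.mem_iff.mp hm) with rfl | hm'
        · exact hx
        · exact hpq m hm'
    simp only [List.foldl_cons]
    rw [key_step vals hs x hx pq hpq ss]
    have hmain := ih (fun y hy => hxs y (by simp [hy])) (bodyA (ss, pq) x).1 (bodyA (ss, pq) x).2 hpq'
    rwa [Prod.mk.eta] at hmain

-- reduce the indexed folds/maps over pyRange to the value list a.take n.toNat
theorem fold_range_eq {β : Type} (a : List Int) (n : Int) (hn : n ≤ (a.length : Int))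
    (f : β → Int → β) (init : β) :
    (PySem.List.pyRange 0 n 1).foldl (fun acc j => f acc (PySem.List.pyGetD a j 0)) init
      = (a.take n.toNat).foldl f init := by
  by_cases h0 : 0 ≤ n
  · have hlen : ((a.take n.toNat).length : Int) = n := by
      simp [List.length_take]
      omega
    conv_lhs => rw [← hlen]
    rw [← PySem.List.foldl_pyRange_zero_pyGetD' (a.take n.toNat) 0 f init]
    apply PySem.List.foldl_congr_mem
    intro acc j hj
    have hj' := PySem.List.mem_pyRange_one.mp hj
    congr 1
    rw [PySem.List.pyGetD_of_nonneg a 0 hj'.1, PySem.List.pyGetD_of_nonneg _ 0 hj'.1]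
    rw [List.getD_eq_getElem?_getD, List.getD_eq_getElem?_getD, List.getElem?_take]
    have : j.toNat < n.toNat := by omega
    simp [this]
  · have hr : PySem.List.pyRange 0 n 1 = [] := by
      simp [PySem.List.pyRange]
      omega
    have ht : n.toNat = 0 := by omega
    simp [hr, ht]

theorem map_range_eq (a : List Int) (n : Int) (hn : n ≤ (a.length : Int)) :
    (PySem.List.pyRange 0 n 1).map (fun i => PySem.List.pyGetD a i 0) = a.take n.toNat := by
  by_cases h0 : 0 ≤ n
  · apply List.ext_getElem
    · simp [PySem.List.length_pyRange_one, List.length_take]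
      omega
    · intro k h1 h2
      have hk : k < n.toNat := by
        simpa [PySem.List.length_pyRange_one] using h1
      have hk2 : k < a.length := by omega
      simp only [List.getElem_map, PySem.List.getElem_pyRange_one, zero_add,
        List.getElem_take]
      rw [PySem.List.pyGetD_eq_getElem a (i := (k : Int)) 0 (by omega) (by exact_mod_cast hk2)]
      simp
  · have hr : PySem.List.pyRange 0 n 1 = [] := by
      simp [PySem.List.pyRange]
      omega
    have ht : n.toNat = 0 := by omega
    simp [hr, ht]

-- ===== VERDICT (by name: the statement is the Claim_ definition above) =====
theorem DecreasingArray_spec : Claim_equal_DecreasingArray := by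
  intro a n _ hpre
  unfold Spec_DecreasingArray
  have hA : DecreasingArray a n = ((a.take n.toNat).foldl bodyA ((0 : Int), ([] : List Int))).1 := by
    unfold DecreasingArray
    rw [fold_range_eq a n hpre bodyA ((0 : Int), ([] : List Int))]
  set xs := a.take n.toNat with hxsdef
  set vals := PySem.List.sorted (PySem.Set.ofList xs) (fun v => v) false with hvalsdef
  have hB : DecreasingArray_alt a n
      = (xs.foldl (stepB vals) (List.replicate vals.length 0)).headD 0 := by
    unfold DecreasingArray_alt
    rw [map_range_eq a n hpre]
  have hs : vals.Pairwise (· < ·) := by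
    rw [hvalsdef]; exact PySem.List.sorted_ofList_pairwise_lt xs
  have hmem : ∀ y ∈ xs, y ∈ vals := by
    intro y hy
    rw [hvalsdef, PySem.List.mem_sorted]
    exact (PySem.Set.mem_ofList xs y).mpr hy
  have hinit : (List.replicate vals.length (0 : Int))
      = vals.map (fun v => (0 : Int) + R ([] : List Int) v) := by
    simp [R]
  obtain ⟨heq, hsub⟩ := fold_inv vals hs xs hmem 0 [] (by simp)
  rw [hA, hB, hinit, heq]
  cases hv : vals with
  | nil =>
    have hxnil : xs = [] := by
      by_contra hne
      cases hx : xs with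
      | nil => exact hne hx
      | cons y ys =>
        have : y ∈ vals := hmem y (by rw [hx]; simp)
        rw [hv] at this
        simp at this
    simp [hxnil]
  | cons v0 vrest =>
    simp only [List.map_cons, List.headD_cons]
    have h0 : R ((xs.foldl bodyA (0, [])).2) v0 = 0 := by
      apply R_zero_of_le
      intro m hm
      have hmv : m ∈ vals := hsub m hm
      rw [hv] at hmv
      rcases List.mem_cons.mp hmv with rfl | h
      · exact le_refl _
      · exact le_of_lt ((List.pairwise_cons.mp (hv ▸ hs)).1 m h)
    omega
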